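-- pv_equiv track=rewrite | github.com/wiwitrifai/competitive-programming | hackerrank/w30/melodious-password.py | rec
-- ===== SOURCE A (Python) =====
-- def vowels(c):
--     return chr(c) in ['a', 'i', 'u', 'e', 'o'];
--
-- def rec(cur, n, isvowels):
--     if n == 0:
--         return [cur]
--     ret = []
--     for c in range(ord('a'), ord('z')+1):
--         if c == ord('y'): continue
--         if isvowels == vowels(c):
--             ret += rec(cur + chr(c), n-1, not isvowels)
--     return ret
-- ===== SOURCE B (Python) =====
-- VOWEL_LETTERS = ['a', 'e', 'i', 'o', 'u']
-- CONSONANT_LETTERS = [c for c in 'abcdefghijklmnopqrstuvwxyz'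
--                      if c not in VOWEL_LETTERS and c != 'y']
--
-- def rec(cur, n, isvowels):
--     results = [cur]
--     flag = isvowels
--     for _ in range(n):
--         letters = VOWEL_LETTERS if flag else CONSONANT_LETTERS
--         results = [r + c for r in results for c in letters]
--         flag = not flag
--     return results
-- ===== Notes on version B (the rewrite author's own statement) =====
-- stated objective: alternative
-- what changed: Replaces the letter-by-letter recursion (scanning a..z with a vowel test each call) with an iterative breadth-wise expansion over precomputed vowel/consonant letter lists, extending the whole result list once per position.
import Mathlib
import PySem

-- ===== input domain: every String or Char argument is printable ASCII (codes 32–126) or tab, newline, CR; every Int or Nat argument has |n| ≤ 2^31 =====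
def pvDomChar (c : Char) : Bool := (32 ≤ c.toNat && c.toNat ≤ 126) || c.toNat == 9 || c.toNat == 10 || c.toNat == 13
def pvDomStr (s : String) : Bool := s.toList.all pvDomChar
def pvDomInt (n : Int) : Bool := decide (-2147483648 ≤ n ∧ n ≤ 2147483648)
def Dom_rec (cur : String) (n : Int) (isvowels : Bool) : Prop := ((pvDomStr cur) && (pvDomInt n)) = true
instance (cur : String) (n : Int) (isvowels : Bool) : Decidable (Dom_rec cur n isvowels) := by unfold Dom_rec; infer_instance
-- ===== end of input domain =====

-- B replaces A's per-letter recursion (scan a..z, vowel-test each code) by an iterative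
-- breadth-wise expansion over precomputed vowel/consonant letter lists (objective: alternative).

-- ===== PORT A =====
-- vowels(c) = chr(c) in ['a','i','u','e','o']
def pyVowels (c : Int) : Bool := ['a', 'i', 'u', 'e', 'o'].contains (Char.ofNat c.toNat)

-- the recursion, with n.toNat as the structural fuel ('if n == 0' is the base case; n < 0,
-- where Python recurses forever, is excluded by Pre_rec)
def recAux : String → Nat → Bool → List String
  | cur, 0, _ => [cur]
  | cur, m + 1, isv =>
      (PySem.List.pyRange 97 123 1).foldl
        (fun ret c =>
          if c == 121 then ret
          else if isv == pyVowels c then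
            ret ++ recAux (cur.push (Char.ofNat c.toNat)) m (!isv)
          else ret)
        []

def rec (cur : String) (n : Int) (isvowels : Bool) : List String :=
  recAux cur n.toNat isvowels

-- ===== PORT B =====
def vowelLetters : List Char := ['a', 'e', 'i', 'o', 'u']
def consonantLetters : List Char :=
  "abcdefghijklmnopqrstuvwxyz".toList.filter (fun c => !(vowelLetters.contains c) && c != 'y')

def rec_alt (cur : String) (n : Int) (isvowels : Bool) : List String :=
  ((List.range n.toNat).foldl
    (fun (st : List String × Bool) _ =>
      (st.1.flatMap (fun r =>
         (if st.2 then vowelLetters else consonantLetters).map (fun c => r.push c)),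
       !st.2))
    ([cur], isvowels)).1

-- ===== PRECONDITION & SPEC =====
-- For n < 0 the Python A never reaches its base case and raises RecursionError.
def Pre_rec (cur : String) (n : Int) (isvowels : Bool) : Prop := 0 ≤ n
instance (cur : String) (n : Int) (isvowels : Bool) : Decidable (Pre_rec cur n isvowels) := by unfold Pre_rec; infer_instance
def pvWitness_rec : String × Int × Bool := ("a", 2, true)

def Spec_rec (cur : String) (n : Int) (isvowels : Bool) (out : List String) : Prop := out = rec_alt cur n isvowels
instance (cur : String) (n : Int) (isvowels : Bool) (out : List String) : Decidable (Spec_rec cur n isvowels out) := by unfold Spec_rec; infer_instance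

-- ===== CLAIM (what is proved, stated in full; the proofs are below) =====
def Claim_equal_rec : Prop := ∀ (cur : String) (n : Int) (isvowels : Bool), Dom_rec cur n isvowels → Pre_rec cur n isvowels → Spec_rec cur n isvowels (rec cur n isvowels)

-- ===== LEMMAS AND PROOFS =====

-- one recursion step of A = one flatMap expansion over the matching letter list
lemma recAux_succ (cur : String) (m : Nat) (isv : Bool) :
    recAux cur (m + 1) isv =
      (if isv then vowelLetters else consonantLetters).flatMap
        (fun c => recAux (cur.push c) m (!isv)) := by
  have h : PySem.List.pyRange 97 123 1 = [97,98,99,100,101,102,103,104,105,106,107,108,109,110,111,112,113,114,115,116,117,118,119,120,121,122] := by decide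
  cases isv <;>
    simp [recAux, h, pyVowels, vowelLetters, consonantLetters, List.foldl, List.flatMap]

-- peeling the first iteration of B's loop
lemma rec_alt_iter_succ (m : Nat)
    (f : List String × Bool → Nat → List String × Bool) (st : List String × Bool)
    (hf : ∀ st i j, f st i = f st j) :
    (List.range (m + 1)).foldl f st = (List.range m).foldl f (f st 0) := by
  rw [List.range_succ_eq_map, List.foldl_cons, List.foldl_map]
  exact List.foldl_ext _ _ _ (fun st' i _ => hf st' (i+1) i)

-- B's loop state, started from any result list, is the flatMap of A's recursion
lemma iter_eq_flatMap (m : Nat) (rs : List String) (isv : Bool) :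
    ((List.range m).foldl
      (fun (st : List String × Bool) _ =>
        (st.1.flatMap (fun r =>
           (if st.2 then vowelLetters else consonantLetters).map (fun c => r.push c)),
         !st.2))
      (rs, isv)).1 = rs.flatMap (fun r => recAux r m isv) := by
  induction m generalizing rs isv with
  | zero => simp [recAux]
  | succ m ih =>
      rw [rec_alt_iter_succ _ _ _ (fun _ _ _ => rfl), ih]
      simp only [List.flatMap_assoc, List.flatMap_map]
      exact List.flatMap_congr (fun r _ => (recAux_succ r m isv).symm)

-- ===== VERDICT (by name: the statement is the Claim_ definition above) =====
theorem rec_spec : Claim_equal_rec := by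
  intro cur n isv _ _
  unfold Spec_rec rec rec_alt
  rw [iter_eq_flatMap]
  simp
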